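-- pv_equiv track=rewrite | github.com/nitin-pandita/Data-Structure-in-Python | GeekForGeek/Array/Day 1/AllNegativePostive.py | NegativePositive
-- ===== SOURCE A (Python) =====
-- def NegativePositive(arr,n):
--     arr1 = []
--     arr2 = []
--
--     for i in arr:
--         if i < 0:
--             arr1.append(i)
--         else:
--             arr2.append(i)
--
--     arr3 = arr2 + arr1
--
--     # for i in range(n):
--     #     arr[i] = arr3[i]
--
--     return arr3
-- ===== SOURCE B (Python) =====
-- def NegativePositive(arr, n):
--     # Stable sort on a boolean key: non-negatives (False) first, negatives (True) last,
--     # each group keeping its original order.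
--     return sorted(arr, key=lambda x: x < 0)
-- ===== Notes on version B (the rewrite author's own statement) =====
-- stated objective: idiomatic
-- what changed: Replaces the two-bucket accumulation loop with a single stable sort on the boolean key (x < 0), relying on sort stability to keep each group in original order.
import Mathlib
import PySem

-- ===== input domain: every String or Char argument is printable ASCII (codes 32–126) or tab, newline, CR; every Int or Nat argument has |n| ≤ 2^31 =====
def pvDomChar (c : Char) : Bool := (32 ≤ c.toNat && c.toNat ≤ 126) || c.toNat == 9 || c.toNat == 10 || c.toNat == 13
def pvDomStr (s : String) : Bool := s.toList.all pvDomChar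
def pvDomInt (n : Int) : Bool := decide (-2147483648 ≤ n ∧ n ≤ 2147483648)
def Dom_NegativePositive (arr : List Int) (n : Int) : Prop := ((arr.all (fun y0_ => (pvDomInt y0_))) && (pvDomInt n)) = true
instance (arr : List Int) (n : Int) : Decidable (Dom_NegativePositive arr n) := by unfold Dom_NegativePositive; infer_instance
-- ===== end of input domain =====

-- B replaces A's two-bucket loop with one stable sort on the boolean key (x < 0); objective: idiomatic.

-- ===== PORT A =====
-- two accumulators arr1 (negatives) and arr2 (non-negatives), then arr2 + arr1
def NegativePositive (arr : List Int) (n : Int) : List Int :=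
  let p := arr.foldl (fun (st : List Int × List Int) i =>
    if i < 0 then (st.1 ++ [i], st.2) else (st.1, st.2 ++ [i])) ([], [])
  p.2 ++ p.1

-- ===== PORT B =====
-- sorted(arr, key=lambda x: x < 0)
def NegativePositive_alt (arr : List Int) (n : Int) : List Int :=
  PySem.List.sorted arr (fun x => decide (x < 0)) false

-- ===== PRECONDITION & SPEC =====
def Spec_NegativePositive (arr : List Int) (n : Int) (out : List Int) : Prop := out = NegativePositive_alt arr n
instance (arr : List Int) (n : Int) (out : List Int) : Decidable (Spec_NegativePositive arr n out) := by unfold Spec_NegativePositive; infer_instance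

-- ===== CLAIM (what is proved, stated in full; the proofs are below) =====
def Claim_equal_NegativePositive : Prop := ∀ (arr : List Int) (n : Int), Dom_NegativePositive arr n → Spec_NegativePositive arr n (NegativePositive arr n)

-- ===== LEMMAS AND PROOFS =====

-- the boolean key and the comparison used by the insertion sort
def pvKey (x : Int) : Bool := decide (x < 0)
def pvBefore (a b : Int) : Bool := decide (pvKey a < pvKey b)

lemma pvBefore_of_nonneg_nonneg {x y : Int} (hx : ¬ x < 0) (hy : ¬ y < 0) :
    pvBefore x y = false := by
  simp [pvBefore, pvKey, hx, hy]

lemma pvBefore_of_neg {x : Int} (hx : x < 0) (y : Int) : pvBefore x y = false := by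
  simp [pvBefore, pvKey, hx, Bool.lt_iff]

lemma pvBefore_of_nonneg_neg {x y : Int} (hx : ¬ x < 0) (hy : y < 0) :
    pvBefore x y = true := by
  simp [pvBefore, pvKey, hx, hy, Bool.lt_iff]

-- inserting a non-negative element into (non-negatives ++ negatives) lands between the groups
lemma insertBy_nonneg (x : Int) (hx : ¬ x < 0) :
    ∀ (P N : List Int), (∀ y ∈ P, ¬ y < 0) → (∀ y ∈ N, y < 0) →
    PySem.List.insertBy pvBefore x (P ++ N) = (P ++ [x]) ++ N := by
  intro P
  induction P with
  | nil =>
    intro N _ hN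
    cases N with
    | nil => simp [PySem.List.insertBy]
    | cons z zs =>
      have hz : z < 0 := hN z (by simp)
      simp [PySem.List.insertBy, pvBefore_of_nonneg_neg hx hz]
  | cons p ps ih =>
    intro N hP hN
    have hp : ¬ p < 0 := hP p (by simp)
    have : PySem.List.insertBy pvBefore x (p :: (ps ++ N)) =
        p :: PySem.List.insertBy pvBefore x (ps ++ N) := by
      simp [PySem.List.insertBy, pvBefore_of_nonneg_nonneg hx hp]
    simpa [this] using congrArg (p :: ·) (ih N (fun y hy => hP y (by simp [hy])) hN)

-- inserting a negative element appends it at the end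
lemma insertBy_neg (x : Int) (hx : x < 0) :
    ∀ (L : List Int), PySem.List.insertBy pvBefore x L = L ++ [x] := by
  intro L
  induction L with
  | nil => simp [PySem.List.insertBy]
  | cons z zs ih => simp [PySem.List.insertBy, pvBefore_of_neg hx z, ih]

-- the insertion-sort fold keeps the state split as (non-negatives ++ negatives)
lemma sorted_fold_invariant :
    ∀ (arr P N : List Int), (∀ y ∈ P, ¬ y < 0) → (∀ y ∈ N, y < 0) →
    arr.foldl (fun acc x => PySem.List.insertBy pvBefore x acc) (P ++ N) =
      (P ++ arr.filter (fun x => !(decide (x < 0)))) ++ (N ++ arr.filter (fun x => decide (x < 0))) := by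
  intro arr
  induction arr with
  | nil => intro P N _ _; simp
  | cons x rest ih =>
    intro P N hP hN
    by_cases hx : x < 0
    · have h1 : PySem.List.insertBy pvBefore x (P ++ N) = P ++ (N ++ [x]) := by
        simpa using insertBy_neg x hx (P ++ N)
      have h2 := ih P (N ++ [x]) hP (by
        intro y hy
        rcases List.mem_append.1 hy with h | h
        · exact hN y h
        · simp at h; omega)
      simp only [List.foldl_cons, h1]
      rw [show P ++ (N ++ [x]) = P ++ (N ++ [x]) from rfl] at h2
      rw [h2]
      simp [hx]
    · have h1 := insertBy_nonneg x hx P N hP hN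
      have h2 := ih (P ++ [x]) N (by
        intro y hy
        rcases List.mem_append.1 hy with h | h
        · exact hP y h
        · simp at h; omega) hN
      simp only [List.foldl_cons, h1]
      rw [h2]
      simp [hx]

-- A's bucket fold computes the two filters
lemma bucket_fold (arr : List Int) :
    ∀ a1 a2 : List Int,
    arr.foldl (fun (st : List Int × List Int) i =>
      if i < 0 then (st.1 ++ [i], st.2) else (st.1, st.2 ++ [i])) (a1, a2) =
      (a1 ++ arr.filter (fun x => decide (x < 0)), a2 ++ arr.filter (fun x => !(decide (x < 0)))) := by
  induction arr with
  | nil => intro a1 a2; simp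
  | cons x rest ih =>
    intro a1 a2
    by_cases hx : x < 0 <;> simp [hx, ih]

-- ===== VERDICT (by name: the statement is the Claim_ definition above) =====
theorem NegativePositive_spec : Claim_equal_NegativePositive := by
  intro arr n _
  unfold Spec_NegativePositive NegativePositive NegativePositive_alt
  rw [PySem.List.sorted_eq_foldl_insertBy]
  have hB := sorted_fold_invariant arr [] [] (by simp) (by simp)
  simp only [List.nil_append] at hB
  simp only [bucket_fold arr [] []]
  simpa [pvBefore, pvKey] using hB.symm
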